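-- pv_equiv track=rewrite | github.com/m-webster/CliffordOpt | Synthesis/clifford_synthesis.py | opListLayers
-- ===== SOURCE A (Python) =====
-- def opListLayers(opList):
--     # opList = QPerm2Front(opList)
--     layers = []
--     for opType,qList in opList:
--         if opType not in {'QPerm','SWAP'} and len(qList) > 1:
--             L = len(layers)
--             i = L
--             qList = set(qList)
--             while i > 0 and len(qList.intersection(layers[i-1])) == 0:
--                 i = i-1
--             if i == L:
--                 layers.append(qList)
--             else:
--                 layers[i].update(qList)
--     return layers
-- ===== SOURCE B (Python) =====
-- def opListLayers(opList):
--     layers = []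
--     last = {}  # qubit -> highest layer index currently containing it
--     for opType, qList in opList:
--         if opType not in {'QPerm', 'SWAP'} and len(qList) > 1:
--             qs = set(qList)
--             m = -1
--             for q in qList:
--                 j = last.get(q, -1)
--                 if j > m:
--                     m = j
--             i = m + 1
--             if i == len(layers):
--                 layers.append(qs)
--             else:
--                 layers[i].update(qs)
--             for q in qList:
--                 last[q] = i
--     return layers
-- ===== Notes on version B (the rewrite author's own statement) =====
-- stated objective: alternative
-- what changed: A finds each op's layer by scanning the layer list backwards with set intersections against existing layers; B instead maintains a dict mapping each qubit to the highest layer index containing it and computes the placement from dict lookups over the op's qubits.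
import Mathlib
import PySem

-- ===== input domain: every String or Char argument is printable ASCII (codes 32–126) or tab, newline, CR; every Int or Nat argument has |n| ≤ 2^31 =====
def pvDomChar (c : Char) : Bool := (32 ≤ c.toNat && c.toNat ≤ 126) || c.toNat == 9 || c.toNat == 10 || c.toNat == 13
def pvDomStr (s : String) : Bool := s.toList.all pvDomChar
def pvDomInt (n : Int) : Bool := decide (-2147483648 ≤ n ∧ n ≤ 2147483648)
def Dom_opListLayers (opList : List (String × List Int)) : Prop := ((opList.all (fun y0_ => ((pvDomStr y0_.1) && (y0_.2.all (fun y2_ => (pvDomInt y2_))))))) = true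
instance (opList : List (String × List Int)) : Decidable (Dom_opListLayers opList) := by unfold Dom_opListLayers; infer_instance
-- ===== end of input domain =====

-- B replaces A's backward scan (set intersections against existing layers) by a dict
-- mapping each qubit to the highest layer index containing it; the placement index is
-- computed from dict lookups over the op's qubits.

-- ===== PORT A =====
-- the while loop 'while i > 0 and len(qList.intersection(layers[i-1])) == 0: i -= 1'
def pvScanA (qs : PySem.Set Int) (layers : List (List Int)) : Nat → Nat
  | 0 => 0
  | i + 1 =>
    if PySem.Set.len (PySem.Set.inter qs (layers.getD i [])) = 0 then
      pvScanA qs layers i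
    else i + 1

def pvStepA (layers : List (List Int)) (op : String × List Int) : List (List Int) :=
  if ¬(op.1 = "QPerm" ∨ op.1 = "SWAP") ∧ 1 < op.2.length then
    let L := layers.length
    let qs := PySem.Set.ofList op.2
    let i := pvScanA qs layers L
    if i = L then layers ++ [qs]
    else layers.set i (PySem.Set.update (layers.getD i []) qs)
  else layers

def opListLayers (opList : List (String × List Int)) : List (List Int) :=
  opList.foldl pvStepA []

-- ===== PORT B =====
def pvStepB (st : List (List Int) × PySem.Dict Int Int) (op : String × List Int) :
    List (List Int) × PySem.Dict Int Int :=
  if ¬(op.1 = "QPerm" ∨ op.1 = "SWAP") ∧ 1 < op.2.length then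
    let qs := PySem.Set.ofList op.2
    let m := op.2.foldl (fun m q => if st.2.getD q (-1) > m then st.2.getD q (-1) else m) (-1)
    let i := m + 1
    let layers :=
      if i = (st.1.length : Int) then st.1 ++ [qs]
      else PySem.List.pySetD st.1 i (PySem.Set.update (PySem.List.pyGetD st.1 i []) qs)
    (layers, op.2.foldl (fun d q => d.insert q i) st.2)
  else st

def opListLayers_alt (opList : List (String × List Int)) : List (List Int) :=
  (opList.foldl pvStepB ([], PySem.Dict.empty)).1

-- ===== PRECONDITION & SPEC =====
def Spec_opListLayers (opList : List (String × List Int)) (out : List (List Int)) : Prop := out = opListLayers_alt opList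
instance (opList : List (String × List Int)) (out : List (List Int)) : Decidable (Spec_opListLayers opList out) := by unfold Spec_opListLayers; infer_instance

-- ===== CLAIM (what is proved, stated in full; the proofs are below) =====
def Claim_equal_opListLayers : Prop := ∀ (opList : List (String × List Int)), Dom_opListLayers opList → Spec_opListLayers opList (opListLayers opList)

-- ===== LEMMAS AND PROOFS =====

-- "v is the greatest layer index whose layer contains q, or -1 if none"
def pvInvAt (layers : List (List Int)) (v : Int) (q : Int) : Prop :=
  (v = -1 ∧ ∀ j : Nat, j < layers.length → q ∉ layers.getD j []) ∨
  (∃ jn : Nat, v = (jn : Int) ∧ jn < layers.length ∧ q ∈ layers.getD jn [] ∧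
    ∀ j : Nat, jn < j → j < layers.length → q ∉ layers.getD j [])

def pvInv (layers : List (List Int)) (d : PySem.Dict Int Int) : Prop :=
  ∀ q : Int, pvInvAt layers (d.getD q (-1)) q

lemma pv_inter_empty (qs l : List Int) :
    PySem.Set.len (PySem.Set.inter qs l) = 0 ↔ ∀ x ∈ qs, x ∉ l := by
  simp [PySem.Set.len, PySem.Set.inter, List.length_eq_zero_iff, List.filter_eq_nil_iff]

lemma pvScanA_le (qs : PySem.Set Int) (layers : List (List Int)) (i : Nat) :
    pvScanA qs layers i ≤ i := by
  induction i with
  | zero => simp [pvScanA]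
  | succ i ih =>
    simp only [pvScanA]
    split_ifs with h
    · omega
    · omega

lemma pvScanA_disj (qs : PySem.Set Int) (layers : List (List Int)) (i : Nat) :
    ∀ j, pvScanA qs layers i ≤ j → j < i → ∀ x ∈ qs, x ∉ layers.getD j [] := by
  induction i with
  | zero => intro j _ h; omega
  | succ i ih =>
    intro j h1 h2
    simp only [pvScanA] at h1
    split_ifs at h1 with h
    · rcases Nat.lt_or_ge j i with hj | hj
      · exact ih j h1 hj
      · have hji : j = i := by omega
        subst hji
        exact (pv_inter_empty qs _).mp h
    · omega

lemma pvScanA_hit (qs : PySem.Set Int) (layers : List (List Int)) (i : Nat) :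
    pvScanA qs layers i = 0 ∨
      ∃ x ∈ qs, x ∈ layers.getD (pvScanA qs layers i - 1) [] := by
  induction i with
  | zero => left; rfl
  | succ i ih =>
    simp only [pvScanA]
    split_ifs with h
    · exact ih
    · right
      rw [pv_inter_empty] at h
      push Not at h
      obtain ⟨x, hx, hxl⟩ := h
      exact ⟨x, hx, by simpa using hxl⟩

lemma pvFoldMax_ge (f : Int → Int) (l : List Int) : ∀ (a : Int),
    a ≤ l.foldl (fun m q => if f q > m then f q else m) a := by
  induction l with
  | nil => intro a; simp
  | cons q l ih =>
    intro a
    simp only [List.foldl_cons]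
    refine le_trans ?_ (ih _)
    split_ifs with h <;> omega

lemma pvFoldMax_ub (f : Int → Int) (l : List Int) : ∀ (a q : Int), q ∈ l →
    f q ≤ l.foldl (fun m q => if f q > m then f q else m) a := by
  induction l with
  | nil => intro a q h; simp at h
  | cons p l ih =>
    intro a q hq
    simp only [List.foldl_cons]
    rcases List.mem_cons.mp hq with h | h
    · subst h
      refine le_trans ?_ (pvFoldMax_ge f l _)
      split_ifs with h <;> omega
    · exact ih _ q h

lemma pvFoldMax_cases (f : Int → Int) (l : List Int) : ∀ (a : Int),
    l.foldl (fun m q => if f q > m then f q else m) a = a ∨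
      ∃ q ∈ l, l.foldl (fun m q => if f q > m then f q else m) a = f q := by
  induction l with
  | nil => intro a; left; rfl
  | cons p l ih =>
    intro a
    simp only [List.foldl_cons]
    rcases ih (if f p > a then f p else a) with h | ⟨q, hq, h⟩
    · rw [h]
      by_cases hp : f p > a
      · right; exact ⟨p, List.mem_cons_self .., by simp [hp]⟩
      · left; simp [hp]
    · right; exact ⟨q, List.mem_cons_of_mem _ hq, h⟩

lemma pvGetD_foldl_insert (v : Int) (l : List Int) : ∀ (d : PySem.Dict Int Int) (k : Int),
    (l.foldl (fun d q => d.insert q v) d).getD k (-1) =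
      if k ∈ l then v else d.getD k (-1) := by
  induction l with
  | nil => intro d k; simp
  | cons q l ih =>
    intro d k
    simp only [List.foldl_cons, ih, PySem.Dict.getD_insert, List.mem_cons]
    by_cases h1 : k ∈ l <;> by_cases h2 : k = q <;> simp [h1, h2]

lemma pvGetD_append_lt (l : List (List Int)) (a : List Int) (j : Nat) (h : j < l.length) :
    (l ++ [a]).getD j [] = l.getD j [] := by
  simp [List.getD_eq_getElem?_getD, List.getElem?_append_left h]

lemma pvGetD_concat_len (l : List (List Int)) (a : List Int) :
    (l ++ [a]).getD l.length [] = a := by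
  simp [List.getD_eq_getElem?_getD]

lemma pvGetD_set_self (l : List (List Int)) (n : Nat) (a : List Int) (h : n < l.length) :
    (l.set n a).getD n [] = a := by
  simp [List.getD_eq_getElem?_getD, h]

lemma pvGetD_set_ne (l : List (List Int)) (n : Nat) (a : List Int) (j : Nat) (h : j ≠ n) :
    (l.set n a).getD j [] = l.getD j [] := by
  simp [List.getD_eq_getElem?_getD, List.getElem?_set_ne (Ne.symm h)]

-- the dict value bound: B's folded maximum is below the number of layers
lemma pvFold_lt_len (layers : List (List Int)) (d : PySem.Dict Int Int) (qList : List Int)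
    (hInv : pvInv layers d) :
    qList.foldl (fun m q => if d.getD q (-1) > m then d.getD q (-1) else m) (-1)
      < (layers.length : Int) := by
  rcases pvFoldMax_cases (fun q => d.getD q (-1)) qList (-1) with h | ⟨q, _, h⟩
  · rw [h]; omega
  · rw [h]
    show d.getD q (-1) < (layers.length : Int)
    rcases hInv q with ⟨hv, _⟩ | ⟨jn, hv, hjn, _, _⟩
    · rw [hv]; omega
    · rw [hv]; exact_mod_cast hjn

-- the heart of the equivalence: A's backward scan lands exactly at (max dict value) + 1
lemma pvScan_eq_fold (layers : List (List Int)) (d : PySem.Dict Int Int) (qList : List Int)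
    (hInv : pvInv layers d) :
    (pvScanA (PySem.Set.ofList qList) layers layers.length : Int)
      = qList.foldl (fun m q => if d.getD q (-1) > m then d.getD q (-1) else m) (-1) + 1 := by
  set qs := PySem.Set.ofList qList with hqs
  set m := qList.foldl (fun m q => if d.getD q (-1) > m then d.getD q (-1) else m) (-1) with hm
  set iA := pvScanA qs layers layers.length with hiA
  have hge : -1 ≤ m := by rw [hm]; exact pvFoldMax_ge _ _ _
  have h1 : m + 1 ≤ (iA : Int) := by
    rcases pvFoldMax_cases (fun q => d.getD q (-1)) qList (-1) with hc | ⟨q, hq, hc⟩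
    · rw [hm, hc]; omega
    · have hq2 : m = d.getD q (-1) := by rw [hm]; exact hc
      rcases hInv q with ⟨hv, _⟩ | ⟨jn, hv, hjn, hmem, _⟩
      · rw [hv] at hq2; omega
      · rw [hv] at hq2
        by_contra hlt
        have hle : iA ≤ jn := by omega
        have hqqs : q ∈ qs := by rw [hqs]; exact (PySem.Set.mem_ofList qList q).mpr hq
        exact pvScanA_disj qs layers layers.length jn hle hjn q hqqs hmem
  have h2 : (iA : Int) ≤ m + 1 := by
    by_cases hi0 : iA = 0
    · rw [hi0]; omega
    rcases pvScanA_hit qs layers layers.length with h0 | ⟨x, hxqs, hxmem⟩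
    · rw [← hiA] at h0; omega
    · rw [← hiA] at hxmem
      have hxl : x ∈ qList := by rw [hqs] at hxqs; exact (PySem.Set.mem_ofList qList x).mp hxqs
      have hiALe : iA ≤ layers.length := by rw [hiA]; exact pvScanA_le _ _ _
      rcases hInv x with ⟨_, hnone⟩ | ⟨jn, hv, hjn, _, hmax⟩
      · exact absurd hxmem (hnone (iA - 1) (by omega))
      · have hle : iA - 1 ≤ jn := by
          by_contra hgt
          exact hmax (iA - 1) (by omega) (by omega) hxmem
        have hubx : d.getD x (-1) ≤ m := by rw [hm]; exact pvFoldMax_ub _ _ _ x hxl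
        rw [hv] at hubx
        omega
  omega

lemma pvStep_main (layers : List (List Int)) (d : PySem.Dict Int Int) (op : String × List Int)
    (hInv : pvInv layers d) :
    (pvStepB (layers, d) op).1 = pvStepA layers op ∧
      pvInv (pvStepA layers op) ((pvStepB (layers, d) op).2) := by
  by_cases hg : ¬(op.1 = "QPerm" ∨ op.1 = "SWAP") ∧ 1 < op.2.length
  · simp only [pvStepA, pvStepB, if_pos hg]
    set qs := PySem.Set.ofList op.2 with hqs
    set m := op.2.foldl (fun m q => if d.getD q (-1) > m then d.getD q (-1) else m) (-1) with hm
    set iA := pvScanA qs layers layers.length with hiA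
    have hkey : (iA : Int) = m + 1 := by
      rw [hiA, hqs, hm]; exact pvScan_eq_fold layers d op.2 hInv
    have hge : -1 ≤ m := by rw [hm]; exact pvFoldMax_ge _ _ _
    have hmlt : m < (layers.length : Int) := by rw [hm]; exact pvFold_lt_len layers d op.2 hInv
    have hiALe : iA ≤ layers.length := by omega
    have htoNat : (m + 1).toNat = iA := by omega
    have hnewLayers :
        (if m + 1 = (layers.length : Int) then layers ++ [qs]
          else PySem.List.pySetD layers (m + 1)
            (PySem.Set.update (PySem.List.pyGetD layers (m + 1) []) qs)) =
        (if iA = layers.length then layers ++ [qs]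
          else layers.set iA (PySem.Set.update (layers.getD iA []) qs)) := by
      by_cases hEq : iA = layers.length
      · rw [if_pos hEq, if_pos (by omega)]
      · rw [if_neg hEq, if_neg (by omega)]
        rw [PySem.List.pySetD_of_nonneg _ _ (by omega), htoNat]
        have hcast : m + 1 = ((iA : Nat) : Int) := by omega
        rw [hcast, PySem.List.pyGetD_natCast]
    refine ⟨hnewLayers, ?_⟩
    intro q
    rw [pvGetD_foldl_insert]
    by_cases hEq : iA = layers.length
    · -- append case
      rw [if_pos hEq]
      by_cases hq : q ∈ op.2
      · rw [if_pos hq]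
        right
        refine ⟨layers.length, by omega, by simp, ?_, ?_⟩
        · rw [pvGetD_concat_len]
          rw [hqs]; exact (PySem.Set.mem_ofList op.2 q).mpr hq
        · intro j h1 h2
          simp only [List.length_append, List.length_cons, List.length_nil] at h2
          omega
      · rw [if_neg hq]
        have hqqs : q ∉ qs := by
          rw [hqs]; intro hmem; exact hq ((PySem.Set.mem_ofList op.2 q).mp hmem)
        rcases hInv q with ⟨hv, hnone⟩ | ⟨jn, hv, hjn, hmem, hmax⟩
        · left
          refine ⟨hv, ?_⟩
          intro j hj
          simp only [List.length_append, List.length_cons, List.length_nil] at hj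
          by_cases hjL : j < layers.length
          · rw [pvGetD_append_lt _ _ _ hjL]; exact hnone j hjL
          · have : j = layers.length := by omega
            subst this
            rw [pvGetD_concat_len]; exact hqqs
        · right
          refine ⟨jn, hv, by simp; omega, by rw [pvGetD_append_lt _ _ _ hjn]; exact hmem, ?_⟩
          intro j h1 h2
          simp only [List.length_append, List.length_cons, List.length_nil] at h2
          by_cases hjL : j < layers.length
          · rw [pvGetD_append_lt _ _ _ hjL]; exact hmax j h1 hjL
          · have : j = layers.length := by omega
            subst this
            rw [pvGetD_concat_len]; exact hqqs
    · -- update-in-place case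
      rw [if_neg hEq]
      have hiALt : iA < layers.length := by omega
      by_cases hq : q ∈ op.2
      · rw [if_pos hq]
        right
        refine ⟨iA, by omega, by simpa using hiALt, ?_, ?_⟩
        · rw [pvGetD_set_self _ _ _ hiALt]
          refine (PySem.Set.mem_update _ _ _).mpr (Or.inr ?_)
          rw [hqs]; exact (PySem.Set.mem_ofList op.2 q).mpr hq
        · intro j h1 h2
          simp only [List.length_set] at h2
          rw [pvGetD_set_ne _ _ _ _ (by omega)]
          intro hmemj
          -- q is in layer j > iA, contradicting that its dict value is ≤ m < j
          have hub : d.getD q (-1) ≤ m := by rw [hm]; exact pvFoldMax_ub _ _ _ q hq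
          rcases hInv q with ⟨_, hnone⟩ | ⟨jn, hv, _, _, hmax⟩
          · exact hnone j h2 hmemj
          · rcases Nat.lt_or_ge jn j with hlt | hge2
            · exact hmax j hlt h2 hmemj
            · rw [hv] at hub; omega
      · rw [if_neg hq]
        have hqqs : q ∉ qs := by
          rw [hqs]; intro hmem; exact hq ((PySem.Set.mem_ofList op.2 q).mp hmem)
        have hmemIff : ∀ j : Nat, j < layers.length →
            (q ∈ (layers.set iA (PySem.Set.update (layers.getD iA []) qs)).getD j [] ↔
              q ∈ layers.getD j []) := by
          intro j hj
          by_cases hji : j = iA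
          · subst hji
            rw [pvGetD_set_self _ _ _ hj]
            constructor
            · intro h
              rcases (PySem.Set.mem_update _ _ _).mp h with h | h
              · exact h
              · exact absurd h hqqs
            · intro h; exact (PySem.Set.mem_update _ _ _).mpr (Or.inl h)
          · rw [pvGetD_set_ne _ _ _ _ hji]
        rcases hInv q with ⟨hv, hnone⟩ | ⟨jn, hv, hjn, hmem, hmax⟩
        · left
          refine ⟨hv, ?_⟩
          intro j hj
          simp only [List.length_set] at hj
          rw [hmemIff j hj]
          exact hnone j hj
        · right
          refine ⟨jn, hv, by simpa using hjn, ?_, ?_⟩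
          · rw [hmemIff jn hjn]; exact hmem
          · intro j h1 h2
            simp only [List.length_set] at h2
            rw [hmemIff j h2]
            exact hmax j h1 h2
  · simp only [pvStepA, pvStepB, if_neg hg]
    exact ⟨trivial, hInv⟩

lemma pvFold_main (ops : List (String × List Int)) (layers : List (List Int))
    (d : PySem.Dict Int Int) (hInv : pvInv layers d) :
    (ops.foldl pvStepB (layers, d)).1 = ops.foldl pvStepA layers := by
  induction ops generalizing layers d with
  | nil => rfl
  | cons op ops ih =>
    have h := pvStep_main layers d op hInv
    have hpair : pvStepB (layers, d) op = (pvStepA layers op, (pvStepB (layers, d) op).2) :=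
      Prod.ext h.1 rfl
    rw [List.foldl_cons, hpair]
    exact ih _ _ h.2

-- ===== VERDICT (by name: the statement is the Claim_ definition above) =====
theorem opListLayers_spec : Claim_equal_opListLayers := by
  intro opList _
  unfold Spec_opListLayers opListLayers opListLayers_alt
  refine (pvFold_main opList [] PySem.Dict.empty ?_).symm
  intro q
  left
  refine ⟨by simp [PySem.Dict.getD_empty], ?_⟩
  intro j hj
  simp only [List.length_nil] at hj
  omega
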